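-- pv_equiv track=rewrite | github.com/MagicHatJo/AoC2023 | 13/point_of_incidence.py | find_reflection_index
-- ===== SOURCE A (Python) =====
-- def count_differences(a, b):
-- 	differences = 0
-- 	for r1, r2 in zip(a, b):
-- 		differences += sum(1 for e1, e2 in zip(r1, r2) if e1 != e2)
-- 	return differences
--
-- def find_reflection_index(arr, smudge):
-- 	for i in range(1, len(arr)):
-- 		top = arr[:i][::-1]
-- 		bot = arr[i:]
-- 		match smudge:
-- 			case True:
-- 				if count_differences(top[:len(bot)], bot[:len(top)]) == 1:
-- 					return i
-- 			case False:
-- 				if top[:len(bot)] == bot[:len(top)]: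
-- 					return i
-- 	return 0
-- ===== SOURCE B (Python) =====
-- def find_reflection_index(arr, smudge):
--     # Canonicalise rows first: each row gets the index of its first occurrence,
--     # so mirror checks compare integer row ids; only id-mismatched pairs are char-diffed.
--     first = {}
--     ids = []
--     for r, row in enumerate(arr):
--         ids.append(first.setdefault(row, r))
--     n = len(arr)
--     for i in range(1, n):
--         mism = [j for j in range(min(i, n - i)) if ids[i - 1 - j] != ids[i + j]]
--         if smudge:
--             total = 0
--             for j in mism:
--                 total += sum(1 for c1, c2 in zip(arr[i - 1 - j], arr[i + j]) if c1 != c2)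
--             if total == 1:
--                 return i
--         else:
--             if not mism:
--                 return i
--     return 0
-- ===== Notes on version B (the rewrite author's own statement) =====
-- stated objective: alternative
-- what changed: B first canonicalises rows with a dict mapping each row to its first-occurrence index, then checks each candidate line on the integer id sequence (collecting the id-mismatched mirror pairs) and char-diffs only those mismatched rows in the smudge case, instead of A's per-candidate reversed/truncated slice copies compared or char-diffed wholesale.
import Mathlib
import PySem

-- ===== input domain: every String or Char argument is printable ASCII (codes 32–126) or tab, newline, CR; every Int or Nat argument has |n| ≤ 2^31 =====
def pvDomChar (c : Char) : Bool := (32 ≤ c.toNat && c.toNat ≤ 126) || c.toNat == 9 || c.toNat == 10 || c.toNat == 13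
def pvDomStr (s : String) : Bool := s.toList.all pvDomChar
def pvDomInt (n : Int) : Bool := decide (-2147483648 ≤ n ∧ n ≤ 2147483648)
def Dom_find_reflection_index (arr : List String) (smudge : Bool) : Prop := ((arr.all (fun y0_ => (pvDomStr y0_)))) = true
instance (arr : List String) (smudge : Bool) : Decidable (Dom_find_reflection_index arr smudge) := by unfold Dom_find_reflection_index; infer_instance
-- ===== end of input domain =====

-- B canonicalises rows via a first-occurrence-index dict so mirror checks compare
-- integer ids, and char-diffs only the id-mismatched rows in the smudge case.

-- ===== PORT A =====
def count_differences (a b : List String) : Int :=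
  (a.zip b).foldl
    (fun differences p =>
      differences + ((p.1.toList.zip p.2.toList).map (fun q => if q.1 ≠ q.2 then (1 : Int) else 0)).sum)
    0

def hitA (arr : List String) (smudge : Bool) (i : Int) : Bool :=
  let top := (PySem.List.slice arr none (some i)).reverse   -- arr[:i][::-1]
  let bot := PySem.List.slice arr (some i) none             -- arr[i:]
  match smudge with
  | true  => count_differences (PySem.List.slice top none (some (PySem.List.len bot)))
               (PySem.List.slice bot none (some (PySem.List.len top))) == 1
  | false => PySem.List.slice top none (some (PySem.List.len bot)) ==
               PySem.List.slice bot none (some (PySem.List.len top))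

def loopA (arr : List String) (smudge : Bool) : List Int → Int
  | [] => 0
  | i :: rest => if hitA arr smudge i then i else loopA arr smudge rest

def find_reflection_index (arr : List String) (smudge : Bool) : Int :=
  loopA arr smudge (PySem.List.pyRange 1 (PySem.List.len arr) 1)

-- ===== PORT B =====
-- the enumerate loop: ids.append(first.setdefault(row, r)); returns (first, ids)
def idsLoop (d : PySem.Dict String Int) (r : Int) : List String → PySem.Dict String Int × List Int
  | [] => (d, [])
  | row :: rest =>
      let v := (PySem.Dict.get? d row).getD r          -- value setdefault returns
      let d' := PySem.Dict.setdefault d row r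
      let res := idsLoop d' (r + 1) rest
      (res.1, v :: res.2)

def row_diff (a b : String) : Int :=
  ((a.toList.zip b.toList).map (fun q => if q.1 ≠ q.2 then (1 : Int) else 0)).sum

def hitB (arr : List String) (ids : List Int) (smudge : Bool) (i : Int) : Bool :=
  let mism := (PySem.List.pyRange 0 (min i (PySem.List.len arr - i)) 1).filter
      (fun j => PySem.List.pyGetD ids (i - 1 - j) 0 != PySem.List.pyGetD ids (i + j) 0)
  if smudge then
    (mism.foldl (fun total j =>
      total + row_diff (PySem.List.pyGetD arr (i - 1 - j) "") (PySem.List.pyGetD arr (i + j) "")) 0) == 1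
  else
    mism.isEmpty

def loopB (arr : List String) (ids : List Int) (smudge : Bool) : List Int → Int
  | [] => 0
  | i :: rest => if hitB arr ids smudge i then i else loopB arr ids smudge rest

def find_reflection_index_alt (arr : List String) (smudge : Bool) : Int :=
  let ids := (idsLoop PySem.Dict.empty 0 arr).2
  loopB arr ids smudge (PySem.List.pyRange 1 (PySem.List.len arr) 1)

-- ===== PRECONDITION & SPEC =====
def Spec_find_reflection_index (arr : List String) (smudge : Bool) (out : Int) : Prop := out = find_reflection_index_alt arr smudge
instance (arr : List String) (smudge : Bool) (out : Int) : Decidable (Spec_find_reflection_index arr smudge out) := by unfold Spec_find_reflection_index; infer_instance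

-- ===== CLAIM (what is proved, stated in full; the proofs are below) =====
def Claim_equal_find_reflection_index : Prop := ∀ (arr : List String) (smudge : Bool), Dom_find_reflection_index arr smudge → Spec_find_reflection_index arr smudge (find_reflection_index arr smudge)

-- ===== LEMMAS AND PROOFS =====

-- dict invariant: all stored ids are < r, and distinct keys have distinct ids
def IdsInv (d : PySem.Dict String Int) (r : Int) : Prop :=
  (∀ v i, d.get? v = some i → i < r) ∧
  (∀ v w i, d.get? v = some i → d.get? w = some i → v = w)

lemma idsLoop_len (d : PySem.Dict String Int) (r : Int) (rows : List String) :
    (idsLoop d r rows).2.length = rows.length := by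
  induction rows generalizing d r with
  | nil => rfl
  | cons row rest ih => simp [idsLoop, ih]

lemma idsLoop_mono (d : PySem.Dict String Int) (r : Int) (rows : List String)
    (v : String) (i : Int) (h : d.get? v = some i) :
    (idsLoop d r rows).1.get? v = some i := by
  induction rows generalizing d r with
  | nil => exact h
  | cons row rest ih =>
    simp only [idsLoop]
    apply ih
    by_cases hc : d.contains row = true
    · rw [PySem.Dict.setdefault_of_contains _ _ hc]; exact h
    · rw [PySem.Dict.setdefault_of_not_contains _ _ (by simpa using hc)]
      rcases eq_or_ne v row with rfl | hne
      · rw [PySem.Dict.contains_eq_isSome_get?, h] at hc; simp at hc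
      · rw [PySem.Dict.get?_insert_of_ne _ _ hne]; exact h

lemma idsLoop_get (d : PySem.Dict String Int) (r : Int) (rows : List String)
    (p : Nat) (hp : p < rows.length) :
    (idsLoop d r rows).1.get? (rows[p]) =
      some ((idsLoop d r rows).2[p]'(by rw [idsLoop_len]; exact hp)) := by
  induction rows generalizing d r p with
  | nil => simp at hp
  | cons row rest ih =>
    cases p with
    | zero =>
      simp only [idsLoop, List.getElem_cons_zero]
      apply idsLoop_mono
      rw [PySem.Dict.get?_setdefault_self]
    | succ p' =>
      simp only [idsLoop, List.getElem_cons_succ]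
      exact ih _ _ _ (by simpa using hp)

lemma idsLoop_inv (d : PySem.Dict String Int) (r : Int) (rows : List String)
    (h : IdsInv d r) :
    ∀ v w i, (idsLoop d r rows).1.get? v = some i → (idsLoop d r rows).1.get? w = some i → v = w := by
  induction rows generalizing d r with
  | nil => exact h.2
  | cons row rest ih =>
    simp only [idsLoop]
    apply ih
    by_cases hc : d.contains row = true
    · rw [PySem.Dict.setdefault_of_contains _ _ hc]
      exact ⟨fun v i hv => by have := h.1 v i hv; omega, h.2⟩
    · rw [PySem.Dict.setdefault_of_not_contains _ _ (by simpa using hc)]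
      constructor
      · intro v i hv
        rw [PySem.Dict.get?_insert] at hv
        split at hv
        · cases hv; omega
        · have := h.1 v i hv; omega
      · intro v w i hv hw
        rw [PySem.Dict.get?_insert] at hv hw
        split at hv <;> split at hw <;> rename_i hv' hw'
        · exact hv'.trans hw'.symm
        · cases hv; exact absurd (h.1 w r hw) (lt_irrefl r)
        · cases hw; exact absurd (h.1 v r hv) (lt_irrefl r)
        · exact h.2 v w i hv hw

-- the ids of two rows are equal iff the rows are equal
lemma ids_eq_iff (arr : List String) (p q : Nat) (hp : p < arr.length) (hq : q < arr.length) :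
    ((idsLoop PySem.Dict.empty 0 arr).2[p]'(by rw [idsLoop_len]; exact hp) =
     (idsLoop PySem.Dict.empty 0 arr).2[q]'(by rw [idsLoop_len]; exact hq)) ↔ arr[p] = arr[q] := by
  constructor
  · intro hid
    apply idsLoop_inv PySem.Dict.empty 0 arr
      ⟨fun v i hv => by simp [PySem.Dict.get?_empty] at hv,
       fun v w i hv _ => by simp [PySem.Dict.get?_empty] at hv⟩
      arr[p] arr[q] _ (idsLoop_get _ _ _ p hp)
    rw [idsLoop_get _ _ _ q hq, hid]
  · intro hrow
    have h1 := idsLoop_get PySem.Dict.empty 0 arr p hp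
    have h2 := idsLoop_get PySem.Dict.empty 0 arr q hq
    rw [hrow, h2] at h1
    exact (Option.some_injective _ h1).symm

lemma row_diff_self (a : String) : row_diff a a = 0 := by
  unfold row_diff
  induction a.toList with
  | nil => rfl
  | cons c cs ih => simpa using ih

-- filtered sum equals full sum when the dropped terms are zero
lemma sum_map_filter_eq {α : Type} (l : List α) (p : α → Bool) (f : α → Int)
    (h : ∀ x ∈ l, p x = false → f x = 0) :
    ((l.filter p).map f).sum = (l.map f).sum := by
  induction l with
  | nil => rfl
  | cons x xs ih =>
    have ih' := ih (fun y hy => h y (List.mem_cons_of_mem _ hy))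
    by_cases hx : p x = true
    · simp [hx, ih']
    · have hz := h x List.mem_cons_self (by simpa using hx)
      simp [hx, ih', hz]

lemma take_rev_take (arr : List String) (iN : Nat) (h2 : iN ≤ arr.length) :
    (arr.take iN).reverse.take (arr.length - iN) =
      (List.range (min iN (arr.length - iN))).map (fun j => arr.getD (iN - 1 - j) "") := by
  apply List.ext_getElem
  · simp only [List.length_take, List.length_reverse, List.length_map, List.length_range]
    omega
  · intro m hm hm'
    simp only [List.length_take, List.length_reverse] at hm
    rw [List.getElem_take, List.getElem_reverse, List.getElem_take]
    simp only [List.getElem_map, List.getElem_range, List.length_take]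
    rw [List.getD_eq_getElem _ _ (by omega)]
    congr 1
    omega

lemma drop_take (arr : List String) (iN : Nat) :
    (arr.drop iN).take iN =
      (List.range (min iN (arr.length - iN))).map (fun j => arr.getD (iN + j) "") := by
  apply List.ext_getElem
  · simp only [List.length_take, List.length_drop, List.length_map, List.length_range]
  · intro m hm hm'
    simp only [List.length_take, List.length_drop] at hm
    rw [List.getElem_take, List.getElem_drop]
    simp only [List.getElem_map, List.getElem_range]
    rw [List.getD_eq_getElem _ _ (by omega)]

lemma pyGetD_sub {α : Type} (xs : List α) (dflt : α) (i : Int) (jn : Nat) (h : (jn : Int) < i) :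
    PySem.List.pyGetD xs (i - 1 - (jn : Int)) dflt = xs.getD (i.toNat - 1 - jn) dflt := by
  rw [PySem.List.pyGetD_of_nonneg xs _ (by omega)]
  congr 1; omega

lemma pyGetD_add {α : Type} (xs : List α) (dflt : α) (i : Int) (jn : Nat) (h : 0 ≤ i) :
    PySem.List.pyGetD xs (i + (jn : Int)) dflt = xs.getD (i.toNat + jn) dflt := by
  rw [PySem.List.pyGetD_of_nonneg xs _ (by omega)]
  congr 1; omega

-- the mism filter keeps exactly the j with differing rows
lemma mism_pred_iff (arr : List String) (i : Int) (jn : Nat)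
    (h1 : 1 ≤ i) (hjn : (jn : Int) < i) (hjn2 : i + jn < (arr.length : Int)) :
    (PySem.List.pyGetD (idsLoop PySem.Dict.empty 0 arr).2 (i - 1 - (jn : Int)) 0 ≠
      PySem.List.pyGetD (idsLoop PySem.Dict.empty 0 arr).2 (i + (jn : Int)) 0) ↔
    arr.getD (i.toNat - 1 - jn) "" ≠ arr.getD (i.toNat + jn) "" := by
  have hp : i.toNat - 1 - jn < arr.length := by omega
  have hq : i.toNat + jn < arr.length := by omega
  rw [pyGetD_sub _ _ _ _ hjn, pyGetD_add _ _ _ _ (by omega)]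
  rw [List.getD_eq_getElem _ _ (by rw [idsLoop_len]; exact hp),
      List.getD_eq_getElem _ _ (by rw [idsLoop_len]; exact hq),
      List.getD_eq_getElem _ _ hp, List.getD_eq_getElem _ _ hq]
  exact not_congr (ids_eq_iff arr _ _ hp hq)

lemma hit_eq (arr : List String) (smudge : Bool) (i : Int)
    (h1 : 1 ≤ i) (h2 : i < (arr.length : Int)) :
    hitA arr smudge i = hitB arr (idsLoop PySem.Dict.empty 0 arr).2 smudge i := by
  have h0 : (0:Int) ≤ i := by omega
  have hklen : (min i ((arr.length : Int) - i)).toNat = min i.toNat (arr.length - i.toNat) := by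
    omega
  have hle : i.toNat ≤ arr.length := by omega
  have htop : PySem.List.slice arr none (some i) = arr.take i.toNat :=
    PySem.List.slice_to arr h0
  have hbot : PySem.List.slice arr (some i) none = arr.drop i.toNat :=
    PySem.List.slice_from arr h0
  -- rewrite the mism filter into a filter over List.range
  have hmism : ((PySem.List.pyRange 0 (min i ((arr.length : Int) - i)) 1).filter
      (fun j => PySem.List.pyGetD (idsLoop PySem.Dict.empty 0 arr).2 (i - 1 - j) 0 !=
                PySem.List.pyGetD (idsLoop PySem.Dict.empty 0 arr).2 (i + j) 0)) =
      List.map (fun k => ((k : Nat) : Int))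
        ((List.range (min i.toNat (arr.length - i.toNat))).filter
          (fun jn => arr.getD (i.toNat - 1 - jn) "" != arr.getD (i.toNat + jn) "")) := by
    rw [PySem.List.pyRange_zero, hklen, List.filter_map]
    refine congrArg _ (List.filter_congr ?_)
    intro jn hjn
    simp only [List.mem_range] at hjn
    simp only [Function.comp]
    rw [Bool.eq_iff_iff, bne_iff_ne, bne_iff_ne]
    exact mism_pred_iff arr i jn h1 (by omega) (by omega)
  cases smudge with
  | false =>
    simp only [hitA, hitB, htop, hbot, Bool.false_eq_true, if_false]
    rw [PySem.List.slice_to _ (by simp), PySem.List.slice_to _ (by simp)]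
    simp only [PySem.List.len_eq, List.length_drop, List.length_reverse, List.length_take,
      Int.toNat_natCast]
    rw [show (min i.toNat arr.length) = i.toNat by omega]
    rw [take_rev_take arr i.toNat hle, drop_take arr i.toNat]
    rw [hmism]
    rw [Bool.eq_iff_iff]
    simp only [beq_iff_eq, List.map_eq_map_iff, List.isEmpty_iff, List.map_eq_nil_iff,
      List.filter_eq_nil_iff, List.mem_range, bne_iff_ne, ne_eq, not_not]
  | true =>
    simp only [hitA, hitB, htop, hbot]
    rw [if_pos trivial]
    rw [PySem.List.slice_to _ (by simp), PySem.List.slice_to _ (by simp)]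
    simp only [PySem.List.len_eq, List.length_drop, List.length_reverse, List.length_take,
      Int.toNat_natCast]
    rw [show (min i.toNat arr.length) = i.toNat by omega]
    rw [take_rev_take arr i.toNat hle, drop_take arr i.toNat]
    rw [hmism]
    congr 1
    have hA : count_differences
        ((List.range (min i.toNat (arr.length - i.toNat))).map (fun j => arr.getD (i.toNat - 1 - j) ""))
        ((List.range (min i.toNat (arr.length - i.toNat))).map (fun j => arr.getD (i.toNat + j) "")) =
        ((List.range (min i.toNat (arr.length - i.toNat))).map
          (fun jn => row_diff (arr.getD (i.toNat - 1 - jn) "") (arr.getD (i.toNat + jn) ""))).sum := by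
      unfold count_differences
      rw [PySem.List.foldl_add, List.zip_map', List.map_map]
      simp only [zero_add]
      refine congrArg _ (List.map_congr_left ?_)
      intro jn _
      rfl
    have hB : (List.map (fun k => ((k : Nat) : Int))
          ((List.range (min i.toNat (arr.length - i.toNat))).filter
            (fun jn => arr.getD (i.toNat - 1 - jn) "" != arr.getD (i.toNat + jn) ""))).foldl
        (fun total j =>
          total + row_diff (PySem.List.pyGetD arr (i - 1 - j) "") (PySem.List.pyGetD arr (i + j) "")) 0 =
        (((List.range (min i.toNat (arr.length - i.toNat))).filter
            (fun jn => arr.getD (i.toNat - 1 - jn) "" != arr.getD (i.toNat + jn) "")).map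
          (fun jn => row_diff (arr.getD (i.toNat - 1 - jn) "") (arr.getD (i.toNat + jn) ""))).sum := by
      rw [PySem.List.foldl_add, List.map_map]
      simp only [zero_add]
      refine congrArg _ (List.map_congr_left ?_)
      intro jn hjn
      simp only [List.mem_filter, List.mem_range] at hjn
      simp only [Function.comp]
      rw [pyGetD_sub _ _ _ _ (by omega : (jn : Int) < i), pyGetD_add _ _ _ _ h0]
    rw [hA, hB]
    rw [sum_map_filter_eq _ _ _
      (fun jn _ hne => by
        show row_diff (arr.getD (i.toNat - 1 - jn) "") (arr.getD (i.toNat + jn) "") = 0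
        rw [bne_eq_false_iff_eq] at hne
        rw [hne]; exact row_diff_self _)]

lemma loop_eq (arr : List String) (smudge : Bool) :
    ∀ l : List Int, (∀ i ∈ l, 1 ≤ i ∧ i < (arr.length : Int)) →
      loopA arr smudge l = loopB arr (idsLoop PySem.Dict.empty 0 arr).2 smudge l
  | [], _ => rfl
  | i :: rest, h => by
    have hi := h i (List.mem_cons_self)
    simp only [loopA, loopB, hit_eq arr smudge i hi.1 hi.2]
    by_cases hb : hitB arr (idsLoop PySem.Dict.empty 0 arr).2 smudge i = true
    · simp [hb]
    · simp [hb, loop_eq arr smudge rest (fun j hj => h j (List.mem_cons_of_mem _ hj))]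

-- ===== VERDICT (by name: the statement is the Claim_ definition above) =====
theorem find_reflection_index_spec : Claim_equal_find_reflection_index := by
  intro arr smudge _
  unfold Spec_find_reflection_index find_reflection_index find_reflection_index_alt
  apply loop_eq
  intro i hi
  simp only [PySem.List.len_eq] at hi
  rw [PySem.List.mem_pyRange_one] at hi
  exact hi
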